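-- pv_equiv track=rewrite | github.com/mavdian14/Portfolio | Data Structures/Heap/Jesse and Cookies.py | cookies
-- ===== SOURCE A (Python) =====
-- from heapq import heapify, heappush, heappop
--
-- def cookies(k, A):
--     #heapify() turns an array A that represents a binary tree into a heap data structure
--     heapify(A)
--     result = 0
--
--     #infinite loop
--     while True:
--         #will pop first/min element
--         x = heappop(A)
--
--         #base case
--         if x >= k:
--             return result
--
--         #if A non-empty
--         if A:
--         #x is first element & y is 2nd element in the heap
--             y = heappop(A)
--             s = x + 2*y
--             heappush(A,s)
--             result+=1
--     #if A has no elements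
--         else:
--             return -1
-- ===== SOURCE B (Python) =====
-- def cookies(k, A):
--     # Return-value equivalent to A; unlike A it does not mutate A in place.
--     # Empty A raises IndexError (q[i]) just as A's heappop does.
--     # Sort once; keep q[i:] sorted by inserting each combined cookie at the
--     # position found by a hand-written binary search.
--     q = sorted(A)
--     i = 0
--     result = 0
--     while True:
--         x = q[i]
--         if x >= k:
--             return result
--         if len(q) - i == 1:
--             return -1
--         s = x + 2 * q[i + 1]
--         i += 2
--         lo, hi = i, len(q)
--         while lo < hi:
--             mid = (lo + hi) // 2
--             if q[mid] < s:
--                 lo = mid + 1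
--             else:
--                 hi = mid
--         q.insert(lo, s)
--         result += 1
-- ===== Notes on version B (the rewrite author's own statement) =====
-- stated objective: alternative
-- what changed: Replaces the binary heap (heapify/heappop/heappush) by a list sorted once up front and kept sorted by inserting each combined cookie at the position found by a hand-written binary search; equivalence is about the returned int only (A mutates A in place, B does not).
import Mathlib
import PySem

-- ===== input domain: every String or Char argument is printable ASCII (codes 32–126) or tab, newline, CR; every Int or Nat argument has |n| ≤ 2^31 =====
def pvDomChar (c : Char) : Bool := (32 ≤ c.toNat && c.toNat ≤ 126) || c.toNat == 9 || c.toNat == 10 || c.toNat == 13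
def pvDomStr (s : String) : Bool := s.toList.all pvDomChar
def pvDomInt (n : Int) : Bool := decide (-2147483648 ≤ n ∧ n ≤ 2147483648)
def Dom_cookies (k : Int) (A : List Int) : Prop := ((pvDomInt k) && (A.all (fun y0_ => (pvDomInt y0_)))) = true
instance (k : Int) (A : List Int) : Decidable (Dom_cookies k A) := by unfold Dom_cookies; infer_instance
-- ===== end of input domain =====

-- B replaces A's binary heap by a list sorted once up front and kept sorted by inserting each
-- combined cookie at the position a hand-written binary search finds; equivalence is about the
-- returned int only (A mutates its argument in place, B does not).

-- ===== PORT A =====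
-- Models heappop: returns the heap's minimum and the remaining elements.  Exact for A's
-- observable values: A only ever uses the popped values and emptiness, and those depend only
-- on the multiset of heap elements, which this model tracks exactly (heapify = identity on
-- the multiset, heappush = append).
def pvPopMin (l : List Int) : Option (Int × List Int) :=
  match PySem.List.min? l (fun v => v) with
  | none => none
  | some m => some (m, l.erase m)

-- A's 'while True' loop; fuel = number of elements suffices (each combine shrinks the heap by
-- one).  Fuel 0 / pop from empty return 0: both unreachable under Pre_cookies (empty A is
-- where Python A raises IndexError).
def cookiesLoop (k : Int) : Nat → List Int → Int → Int
  | 0, _, _ => 0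
  | fuel + 1, l, res =>
    match pvPopMin l with
    | none => 0
    | some (x, l₁) =>
      if x ≥ k then res
      else
        match pvPopMin l₁ with
        | none => -1
        | some (y, l₂) => cookiesLoop k fuel (l₂ ++ [x + 2 * y]) (res + 1)

def cookies (k : Int) (A : List Int) : Int := cookiesLoop k A.length A 0

-- ===== PORT B =====
-- Source B's inner 'while lo < hi' binary search; q[mid] is in range whenever hi ≤ len q, so
-- getD mid 0 is exact there.  fuel is a totality device only: the gap hi - lo shrinks every
-- iteration, so any fuel ≥ hi - lo (the caller passes len q) reproduces the Python loop.
def pvBisect (fuel : Nat) (q : List Int) (s : Int) (lo hi : Nat) : Nat :=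
  match fuel with
  | 0 => lo
  | fuel + 1 =>
    if lo < hi then
      let mid := (lo + hi) / 2
      if q.getD mid 0 < s then pvBisect fuel q s (mid + 1) hi
      else pvBisect fuel q s lo mid
    else lo

-- Source B's outer 'while True' loop over (q, i); len q - i shrinks every iteration, so any
-- fuel > len q - i reproduces the Python loop (fuel is a totality device only).  q[i] raises
-- IndexError when i ≥ len q (only the initially empty q reaches that; unreachable under
-- Pre_cookies), modelled by returning 0 behind the totality guard.
def cookiesAltLoop (k : Int) (fuel : Nat) (q : List Int) (i : Nat) (res : Int) : Int :=
  match fuel with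
  | 0 => 0
  | fuel + 1 =>
    if i < q.length then
      let x := q.getD i 0
      if x ≥ k then res
      else if q.length - i = 1 then -1
      else
        let s := x + 2 * q.getD (i + 1) 0
        let lo := pvBisect q.length q s (i + 2) q.length
        cookiesAltLoop k fuel (q.insertIdx lo s) (i + 2) (res + 1)
    else 0

def cookies_alt (k : Int) (A : List Int) : Int :=
  cookiesAltLoop k ((PySem.List.sorted A (fun v => v) false).length + 1)
    (PySem.List.sorted A (fun v => v) false) 0 0

-- ===== PRECONDITION & SPEC =====
-- Pre_ excludes only the empty list, on which Python A raises IndexError (heappop from an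
-- empty heap); Python B raises IndexError there too.
def Pre_cookies (k : Int) (A : List Int) : Prop := A ≠ []
instance (k : Int) (A : List Int) : Decidable (Pre_cookies k A) := by
  unfold Pre_cookies; infer_instance

def pvWitness_cookies : Int × List Int := (10, [1, 2, 3, 9, 10, 12])

def Spec_cookies (k : Int) (A : List Int) (out : Int) : Prop := out = cookies_alt k A
instance (k : Int) (A : List Int) (out : Int) : Decidable (Spec_cookies k A out) := by
  unfold Spec_cookies; infer_instance

-- ===== CLAIM (what is proved, stated in full; the proofs are below) =====
def Claim_equal_cookies : Prop :=
  ∀ (k : Int) (A : List Int), Dom_cookies k A → Pre_cookies k A →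
    Spec_cookies k A (cookies k A)

-- ===== LEMMAS AND PROOFS =====

-- Canonical 'combine the two smallest' process on an explicitly sorted list (proof-side only):
-- both ports are shown equal to it.
def pvInsertSorted (s : Int) : List Int → List Int
  | [] => [s]
  | a :: t => if a < s then a :: pvInsertSorted s t else s :: a :: t

theorem pvInsertSorted_length (s : Int) (l : List Int) :
    (pvInsertSorted s l).length = l.length + 1 := by
  induction l with
  | nil => rfl
  | cons a t ih => simp only [pvInsertSorted]; split <;> simp [ih]

def pvCanon (k : Int) (q : List Int) (res : Int) : Int :=
  match q with
  | [] => 0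
  | x :: t =>
    if x ≥ k then res
    else
      match t with
      | [] => -1
      | y :: rest => pvCanon k (pvInsertSorted (x + 2 * y) rest) (res + 1)
termination_by q.length
decreasing_by simp [pvInsertSorted_length]

theorem pv_min?_of_perm_sorted (l : List Int) (x : Int) (t : List Int)
    (hp : l.Perm (x :: t)) (hs : (x :: t).Pairwise (· ≤ ·)) :
    PySem.List.min? l (fun v => v) = some x := by
  cases hmin : PySem.List.min? l (fun v => v) with
  | none =>
      have : l = [] := (PySem.List.min?_eq_none_iff l (fun v => v)).1 hmin
      subst this
      exact absurd hp.symm (by simp)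
  | some m =>
      have hm : m ∈ l := PySem.List.min?_mem hmin
      have hmx : m ≤ x := PySem.List.min?_isMin hmin x (hp.mem_iff.2 (by simp))
      have hxm : x ≤ m := by
        rcases List.mem_cons.1 (hp.mem_iff.1 hm) with rfl | hmt
        · rfl
        · exact (List.pairwise_cons.1 hs).1 m hmt
      simp [le_antisymm hmx hxm]

theorem pvInsertSorted_perm (s : Int) (l : List Int) :
    (pvInsertSorted s l).Perm (s :: l) := by
  induction l with
  | nil => simp [pvInsertSorted]
  | cons a t ih =>
      simp only [pvInsertSorted]
      split
      · exact ((ih.cons a).trans (List.Perm.swap s a t))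
      · exact List.Perm.refl _

theorem pvInsertSorted_pairwise (s : Int) (l : List Int)
    (h : l.Pairwise (· ≤ ·)) : (pvInsertSorted s l).Pairwise (· ≤ ·) := by
  induction l with
  | nil => simp [pvInsertSorted]
  | cons a t ih =>
      rcases List.pairwise_cons.1 h with ⟨ha, ht⟩
      simp only [pvInsertSorted]
      split
      · rename_i hlt
        refine List.pairwise_cons.2 ⟨?_, ih ht⟩
        intro b hb
        rcases List.mem_cons.1 ((pvInsertSorted_perm s t).mem_iff.1 hb) with rfl | hbt
        · omega
        · exact ha b hbt
      · rename_i hnlt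
        refine List.pairwise_cons.2 ⟨?_, h⟩
        intro b hb
        rcases List.mem_cons.1 hb with rfl | hbt
        · omega
        · exact le_trans (by omega) (ha b hbt)

-- ===== A-side: the heap loop equals the canonical process =====
theorem pv_loop_eq (k : Int) :
    ∀ (fuel : Nat) (q l : List Int) (res : Int),
      l.Perm q → q.Pairwise (· ≤ ·) → q.length ≤ fuel →
      cookiesLoop k fuel l res = pvCanon k q res := by
  intro fuel
  induction fuel with
  | zero =>
      intro q l res hp _ hlen
      have hq : q = [] := List.eq_nil_of_length_eq_zero (Nat.le_zero.1 hlen)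
      subst hq
      have hl : l = [] := hp.eq_nil
      subst hl
      simp [cookiesLoop, pvCanon]
  | succ f ih =>
      intro q l res hp hs hlen
      cases q with
      | nil =>
          have hl : l = [] := hp.eq_nil
          subst hl
          simp [cookiesLoop, pvCanon, pvPopMin, PySem.List.min?]
      | cons x t =>
          have hmin := pv_min?_of_perm_sorted l x t hp hs
          have hper1 : (l.erase x).Perm t := by
            have := hp.erase x
            simpa using this
          by_cases hxk : x ≥ k
          · rw [pvCanon.eq_def]
            simp [cookiesLoop, pvPopMin, hmin, hxk]
          · cases t with
            | nil =>
                have h0 : l.erase x = [] := hper1.eq_nil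
                have hmin2 : PySem.List.min? (l.erase x) (fun v => v) = none :=
                  (PySem.List.min?_eq_none_iff _ _).2 h0
                rw [pvCanon.eq_def]
                simp [cookiesLoop, pvPopMin, hmin, hmin2, hxk]
            | cons y rest =>
                have hts : (y :: rest).Pairwise (· ≤ ·) :=
                  (List.pairwise_cons.1 hs).2
                have hmin2 := pv_min?_of_perm_sorted (l.erase x) y rest hper1 hts
                have hper2 : ((l.erase x).erase y).Perm rest := by
                  have := hper1.erase y
                  simpa using this
                have hA : cookiesLoop k (f + 1) l res =
                    cookiesLoop k f (((l.erase x).erase y) ++ [x + 2 * y]) (res + 1) := by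
                  simp [cookiesLoop, pvPopMin, hmin, hmin2, hxk]
                have hB : pvCanon k (x :: y :: rest) res =
                    pvCanon k (pvInsertSorted (x + 2 * y) rest) (res + 1) := by
                  rw [pvCanon.eq_def]
                  simp [hxk]
                rw [hA, hB]
                apply ih
                · exact (List.perm_append_comm.trans (hper2.cons _)).trans
                    (pvInsertSorted_perm (x + 2 * y) rest).symm
                · exact pvInsertSorted_pairwise _ _ (List.pairwise_cons.1 hts).2
                · have := List.Perm.length_eq hp
                  simp only [List.length_cons] at this hlen
                  simp only [pvInsertSorted_length] at *
                  omega

-- ===== B-side: the binary search finds the ordered-insert position =====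

-- Characterisation of pvBisect on a range that is sorted (as indices ≥ lo0 of q):
-- everything left of the result is < s, everything right of it is ≥ s.
theorem pvBisect_spec (q : List Int) (s : Int) (lo0 : Nat)
    (Hs : ∀ a b : Nat, lo0 ≤ a → a ≤ b → b < q.length → q.getD a 0 ≤ q.getD b 0) :
    ∀ (d lo hi : Nat), hi - lo ≤ d → lo0 ≤ lo → lo ≤ hi → hi ≤ q.length →
      (∀ t, lo0 ≤ t → t < lo → q.getD t 0 < s) →
      (∀ t, hi ≤ t → t < q.length → s ≤ q.getD t 0) →
      lo0 ≤ pvBisect d q s lo hi ∧ pvBisect d q s lo hi ≤ q.length ∧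
      (∀ t, lo0 ≤ t → t < pvBisect d q s lo hi → q.getD t 0 < s) ∧
      (∀ t, pvBisect d q s lo hi ≤ t → t < q.length → s ≤ q.getD t 0) := by
  intro d
  induction d with
  | zero =>
      intro lo hi hd h0 hle hhi Plo Phi
      simp only [pvBisect]
      have : lo = hi := by omega
      subst this
      exact ⟨h0, by omega, Plo, Phi⟩
  | succ m ih =>
      intro lo hi hd h0 hle hhi Plo Phi
      simp only [pvBisect]
      by_cases hlt : lo < hi
      · simp only [if_pos hlt]
        by_cases hcmp : q.getD ((lo + hi) / 2) 0 < s
        · simp only [if_pos hcmp]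
          refine ih ((lo + hi) / 2 + 1) hi (by omega) (by omega) (by omega) hhi ?_ Phi
          intro t h0t htm
          calc q.getD t 0 ≤ q.getD ((lo + hi) / 2) 0 := Hs t _ h0t (by omega) (by omega)
            _ < s := hcmp
        · simp only [if_neg hcmp]
          refine ih lo ((lo + hi) / 2) (by omega) h0 (by omega) (by omega) Plo ?_
          intro t hmt htl
          calc s ≤ q.getD ((lo + hi) / 2) 0 := by omega
            _ ≤ q.getD t 0 := Hs _ t (by omega) hmt htl
      · simp only [if_neg hlt]
        have : lo = hi := by omega
        subst this
        exact ⟨h0, by omega, Plo, Phi⟩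

-- Inserting at a position with everything before it < s and everything from it on ≥ s is
-- exactly the ordered insert.
theorem pv_insertIdx_eq_insertSorted (s : Int) :
    ∀ (S : List Int) (r : Nat), r ≤ S.length →
      (∀ t, t < r → S.getD t 0 < s) →
      (∀ t, r ≤ t → t < S.length → s ≤ S.getD t 0) →
      S.insertIdx r s = pvInsertSorted s S := by
  intro S
  induction S with
  | nil =>
      intro r hr _ _
      have : r = 0 := by simpa using hr
      subst this
      simp [pvInsertSorted]
  | cons a T ih =>
      intro r hr Plo Phi
      cases r with
      | zero =>
          have : s ≤ a := by simpa [List.getD] using Phi 0 (by omega) (by simp)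
          simp [pvInsertSorted, show ¬ a < s by omega]
      | succ r' =>
          have ha : a < s := by simpa [List.getD] using Plo 0 (by omega)
          simp only [List.insertIdx_succ_cons, pvInsertSorted, if_pos ha]
          congr 1
          refine ih r' (by simpa using hr) ?_ ?_
          · intro t ht
            have := Plo (t + 1) (by omega)
            simpa [List.getD] using this
          · intro t h1 h2
            have := Phi (t + 1) (by omega) (by simpa using h2)
            simpa [List.getD] using this

-- getD of a drop, as an index into the original list
theorem pv_getD_drop (q : List Int) (n t : Nat) :
    (q.drop n).getD t 0 = q.getD (n + t) 0 := by
  simp [List.getD, List.getElem?_drop]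

theorem pv_drop_insertIdx (q : List Int) (n r : Nat) (s : Int) (hn : n ≤ r)
    (hr : r ≤ q.length) :
    (q.insertIdx r s).drop n = (q.drop n).insertIdx (r - n) s := by
  induction q generalizing n r with
  | nil =>
      have : r = 0 := by simpa using hr
      subst this
      have : n = 0 := by omega
      subst this
      simp
  | cons a T ih =>
      cases n with
      | zero => simp
      | succ n' =>
          cases r with
          | zero => omega
          | succ r' =>
              simp only [List.insertIdx_succ_cons, List.drop_succ_cons]
              rw [ih n' r' (by omega) (by simpa using hr)]
              congr 1
              omega

-- ===== B-side: the indexed loop equals the canonical process =====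
theorem pv_alt_loop_eq (k : Int) :
    ∀ (fuel : Nat) (q : List Int) (i : Nat) (res : Int), q.length - i < fuel →
      (q.drop i).Pairwise (· ≤ ·) →
      cookiesAltLoop k fuel q i res = pvCanon k (q.drop i) res := by
  intro fuel
  induction fuel with
  | zero =>
      intro q i res hn hs
      exact absurd hn (by omega)
  | succ m ih =>
      intro q i res hn hs
      by_cases hilt : i < q.length
      · have hdrop : q.drop i = q.getD i 0 :: q.drop (i + 1) := by
          rw [List.drop_eq_getElem_cons hilt]
          simp only [List.getD, List.getElem?_eq_getElem hilt, Option.getD_some]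
        by_cases hxk : q.getD i 0 ≥ k
        · simp only [cookiesAltLoop]
          rw [pvCanon.eq_def]
          simp only [if_pos hilt, hdrop, if_pos hxk]
        · by_cases hone : q.length - i = 1
          · have hd1 : q.drop (i + 1) = [] := List.drop_eq_nil_of_le (by omega)
            simp only [cookiesAltLoop]
            rw [pvCanon.eq_def]
            simp only [if_pos hilt, hdrop, hd1, if_neg hxk, if_pos hone]
          · -- at least two elements remain
            have h2 : i + 2 ≤ q.length := by omega
            have hdrop2 : q.drop (i + 1) = q.getD (i + 1) 0 :: q.drop (i + 2) := by
              rw [List.drop_eq_getElem_cons (show i + 1 < q.length by omega)]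
              simp only [List.getD,
                List.getElem?_eq_getElem (show i + 1 < q.length by omega), Option.getD_some]
            have hsuffix : (q.drop (i + 2)).Pairwise (· ≤ ·) := by
              have h1 := hs
              rw [hdrop] at h1
              have h1 := (List.pairwise_cons.1 h1).2
              rw [hdrop2] at h1
              exact (List.pairwise_cons.1 h1).2
            -- sortedness of the suffix as an index statement
            have Hs : ∀ a b : Nat, i + 2 ≤ a → a ≤ b → b < q.length →
                q.getD a 0 ≤ q.getD b 0 := by
              intro a b hla hab hbl
              rcases Nat.lt_or_ge a b with hab' | hab'
              · have h1 := List.pairwise_iff_getElem.1 hsuffix (a - (i + 2)) (b - (i + 2))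
                  (by simp only [List.length_drop]; omega)
                  (by simp only [List.length_drop]; omega) (by omega)
                have e1 : (q.drop (i + 2))[a - (i + 2)]'(by simp only [List.length_drop]; omega)
                    = q.getD a 0 := by
                  have hidx : i + 2 + (a - (i + 2)) = a := by omega
                  rw [List.getElem_drop]
                  simp only [List.getD, hidx,
                    List.getElem?_eq_getElem (show a < q.length by omega), Option.getD_some]
                have e2 : (q.drop (i + 2))[b - (i + 2)]'(by simp only [List.length_drop]; omega)
                    = q.getD b 0 := by
                  have hidx : i + 2 + (b - (i + 2)) = b := by omega
                  rw [List.getElem_drop]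
                  simp only [List.getD, hidx,
                    List.getElem?_eq_getElem (show b < q.length by omega), Option.getD_some]
                rw [e1, e2] at h1
                exact h1
              · have : a = b := by omega
                simp [this]
            obtain ⟨hr0, hrlen, hrlo, hrhi⟩ :=
              pvBisect_spec q (q.getD i 0 + 2 * q.getD (i + 1) 0) (i + 2) Hs q.length (i + 2)
                q.length (by omega) (le_refl _) h2 (le_refl _)
                (by intro t h1 h2'; omega) (by intro t h1 h2'; omega)
            -- the inserted list, dropped at i+2, is the ordered insert into the suffix
            have hde : (q.insertIdx (pvBisect q.length q (q.getD i 0 + 2 * q.getD (i + 1) 0) (i + 2)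
                  q.length) (q.getD i 0 + 2 * q.getD (i + 1) 0)).drop (i + 2) =
                pvInsertSorted (q.getD i 0 + 2 * q.getD (i + 1) 0) (q.drop (i + 2)) := by
              rw [pv_drop_insertIdx q (i + 2) _ _ hr0 hrlen]
              apply pv_insertIdx_eq_insertSorted
              · simp only [List.length_drop]; omega
              · intro t ht
                rw [pv_getD_drop]
                exact hrlo (i + 2 + t) (by omega) (by omega)
              · intro t h1t h2t
                rw [pv_getD_drop]
                simp only [List.length_drop] at h2t
                exact hrhi (i + 2 + t) (by omega) (by omega)
            have hstep : cookiesAltLoop k (m + 1) q i res =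
                cookiesAltLoop k m (q.insertIdx (pvBisect q.length q (q.getD i 0 + 2 * q.getD (i + 1) 0)
                  (i + 2) q.length) (q.getD i 0 + 2 * q.getD (i + 1) 0)) (i + 2) (res + 1) := by
              simp only [cookiesAltLoop]
              simp only [if_pos hilt, if_neg hxk, if_neg hone]
            have hcanon : pvCanon k (q.drop i) res =
                pvCanon k (pvInsertSorted (q.getD i 0 + 2 * q.getD (i + 1) 0)
                  (q.drop (i + 2))) (res + 1) := by
              rw [hdrop, hdrop2, pvCanon.eq_def]
              simp only [if_neg hxk]
            rw [hstep, hcanon, ← hde]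
            apply ih
            · have : (q.insertIdx (pvBisect q.length q (q.getD i 0 + 2 * q.getD (i + 1) 0) (i + 2)
                  q.length) (q.getD i 0 + 2 * q.getD (i + 1) 0)).length = q.length + 1 := by
                simp only [List.length_insertIdx]
                split <;> omega
              omega
            · rw [hde]
              exact pvInsertSorted_pairwise _ _ hsuffix
      · simp only [cookiesAltLoop]
        rw [pvCanon.eq_def]
        simp only [if_neg hilt, List.drop_eq_nil_of_le (by omega : q.length ≤ i)]

-- ===== VERDICT (by name: the statement is the Claim_ definition above) =====
theorem cookies_spec : Claim_equal_cookies := by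
  intro k A _ _
  unfold Spec_cookies cookies cookies_alt
  rw [pv_alt_loop_eq k ((PySem.List.sorted A (fun v => v) false).length + 1) _ 0 0 (by omega)
    (by simpa using PySem.List.sorted_pairwise A (fun v => v))]
  simp only [List.drop_zero]
  apply pv_loop_eq
  · exact (PySem.List.sorted_perm A (fun v => v) false).symm
  · exact PySem.List.sorted_pairwise A (fun v => v)
  · simp [PySem.List.length_sorted]
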